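-- pv_equiv track=rewrite | github.com/NeuralX-CV/caloraify | telegram_bot.py | streak_message
-- ===== SOURCE A (Python) =====
-- def streak_message(streak: int) -> str:
--     if streak == 0:
--         return "📭 No streak yet — log your first meal to start!"
--     emojis = {1: "🌱", 2: "🌿", 3: "🌳", 7: "🔥", 14: "💪", 30: "🏆"}
--     icon   = "🔥"
--     for threshold, emoji in sorted(emojis.items()):
--         if streak >= threshold:
--             icon = emoji
--     return f"{icon} *{streak}-day logging streak!* Keep it up!"
-- ===== SOURCE B (Python) =====
-- def streak_message(streak: int) -> str:
--     if streak == 0: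
--         return "📭 No streak yet — log your first meal to start!"
--     # tiers as a sorted threshold array; icon found by binary search
--     thresholds = [1, 2, 3, 7, 14, 30]
--     icons = ["🔥", "🌱", "🌿", "🌳", "🔥", "💪", "🏆"]  # icons[i] = emoji for thresholds[i-1] <= streak < thresholds[i]
--     lo, hi = 0, len(thresholds)
--     while lo < hi:  # hand-written bisect_right
--         mid = (lo + hi) // 2
--         if streak < thresholds[mid]:
--             hi = mid
--         else:
--             lo = mid + 1
--     return f"{icons[lo]} *{streak}-day logging streak!* Keep it up!"
-- ===== Notes on version B (the rewrite author's own statement) =====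
-- stated objective: alternative
-- what changed: Replaced the dict-build + sort + full linear accumulating scan over all tiers with a static sorted threshold array and a hand-written bisect_right binary search that indexes a parallel icon array (the un-matched default icon becomes slot 0 of that array).
import Mathlib
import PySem

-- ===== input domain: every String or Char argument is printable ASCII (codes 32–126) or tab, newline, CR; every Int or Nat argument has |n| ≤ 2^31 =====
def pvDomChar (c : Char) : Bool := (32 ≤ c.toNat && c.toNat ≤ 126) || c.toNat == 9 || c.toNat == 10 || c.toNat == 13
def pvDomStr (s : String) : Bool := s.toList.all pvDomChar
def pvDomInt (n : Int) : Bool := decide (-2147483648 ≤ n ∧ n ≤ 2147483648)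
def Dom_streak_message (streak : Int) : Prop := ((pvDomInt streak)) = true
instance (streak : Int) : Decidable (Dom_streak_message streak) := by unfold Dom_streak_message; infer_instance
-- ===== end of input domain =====

-- B replaces A's dict + sort + linear accumulating scan over the tiers by a binary search
-- (hand-written bisect_right) into a static sorted threshold array with a parallel icon array.

-- ===== PORT A =====
-- Python sorts the (int, str) pairs lexicographically; since the first components are
-- distinct, that equals sorting by the first component (exact here), ported with key = fst.
def streak_message (streak : Int) : String :=
  if streak == 0 then "📭 No streak yet — log your first meal to start!"
  else
    let emojis : PySem.Dict Int String :=
      PySem.Dict.ofList [(1, "🌱"), (2, "🌿"), (3, "🌳"), (7, "🔥"), (14, "💪"), (30, "🏆")]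
    let icon := (PySem.List.sorted emojis.items (fun p => p.1) false).foldl
      (fun icon p => if streak ≥ p.1 then p.2 else icon) "🔥"
    icon ++ " *" ++ PySem.Int.toStr streak ++ "-day logging streak!* Keep it up!"

-- ===== PORT B =====
def pvThresholds : List Int := [1, 2, 3, 7, 14, 30]

-- hand-written bisect_right loop from Source B (thresholds[mid] via getD; mid always in range)
def pvBisect (streak : Int) (lo hi : Nat) : Nat :=
  if lo < hi then
    let mid := (lo + hi) / 2
    if streak < pvThresholds.getD mid 0 then pvBisect streak lo mid
    else pvBisect streak (mid + 1) hi
  else lo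
termination_by hi - lo
decreasing_by all_goals omega

def pvIcons : List String := ["🔥", "🌱", "🌿", "🌳", "🔥", "💪", "🏆"]

def streak_message_alt (streak : Int) : String :=
  if streak == 0 then "📭 No streak yet — log your first meal to start!"
  else
    let lo := pvBisect streak 0 pvThresholds.length
    pvIcons.getD lo "" ++ " *" ++ PySem.Int.toStr streak ++ "-day logging streak!* Keep it up!"

-- ===== PRECONDITION & SPEC =====
def Spec_streak_message (streak : Int) (out : String) : Prop := out = streak_message_alt streak
instance (streak : Int) (out : String) : Decidable (Spec_streak_message streak out) := by unfold Spec_streak_message; infer_instance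

-- ===== CLAIM (what is proved, stated in full; the proofs are below) =====
def Claim_equal_streak_message : Prop := ∀ (streak : Int), Dom_streak_message streak → Spec_streak_message streak (streak_message streak)

-- ===== LEMMAS AND PROOFS =====

-- ===== VERDICT (by name: the statement is the Claim_ definition above) =====
theorem streak_message_spec : Claim_equal_streak_message := by
  intro streak _
  unfold Spec_streak_message streak_message streak_message_alt
  by_cases h0 : streak = 0
  · simp [h0]
  · have hne : (streak == 0) = false := by simp [h0]
    rw [hne]
    simp only [Bool.false_eq_true, if_false]
    have hs : PySem.List.sorted (PySem.Dict.ofList [((1:Int), "🌱"), (2, "🌿"), (3, "🌳"), (7, "🔥"), (14, "💪"), (30, "🏆")]).items (fun p => p.1) false = [((1:Int), "🌱"), (2, "🌿"), (3, "🌳"), (7, "🔥"), (14, "💪"), (30, "🏆")] := by decide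
    rw [hs]
    by_cases c0 : streak < 1
    · simp [pvBisect, pvThresholds, pvIcons, List.foldl, show ¬ streak ≥ 1 from by omega, show streak < 1 from by omega, show ¬ streak ≥ 2 from by omega, show streak < 2 from by omega, show ¬ streak ≥ 3 from by omega, show streak < 3 from by omega, show ¬ streak ≥ 7 from by omega, show streak < 7 from by omega, show ¬ streak ≥ 14 from by omega, show streak < 14 from by omega, show ¬ streak ≥ 30 from by omega, show streak < 30 from by omega]
    by_cases c1 : streak < 2
    · simp [pvBisect, pvThresholds, pvIcons, List.foldl, show streak ≥ 1 from by omega, show ¬ streak < 1 from by omega, show ¬ streak ≥ 2 from by omega, show streak < 2 from by omega, show ¬ streak ≥ 3 from by omega, show streak < 3 from by omega, show ¬ streak ≥ 7 from by omega, show streak < 7 from by omega, show ¬ streak ≥ 14 from by omega, show streak < 14 from by omega, show ¬ streak ≥ 30 from by omega, show streak < 30 from by omega]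
    by_cases c2 : streak < 3
    · simp [pvBisect, pvThresholds, pvIcons, List.foldl, show streak ≥ 1 from by omega, show ¬ streak < 1 from by omega, show streak ≥ 2 from by omega, show ¬ streak < 2 from by omega, show ¬ streak ≥ 3 from by omega, show streak < 3 from by omega, show ¬ streak ≥ 7 from by omega, show streak < 7 from by omega, show ¬ streak ≥ 14 from by omega, show streak < 14 from by omega, show ¬ streak ≥ 30 from by omega, show streak < 30 from by omega]
    by_cases c3 : streak < 7
    · simp [pvBisect, pvThresholds, pvIcons, List.foldl, show streak ≥ 1 from by omega, show ¬ streak < 1 from by omega, show streak ≥ 2 from by omega, show ¬ streak < 2 from by omega, show streak ≥ 3 from by omega, show ¬ streak < 3 from by omega, show ¬ streak ≥ 7 from by omega, show streak < 7 from by omega, show ¬ streak ≥ 14 from by omega, show streak < 14 from by omega, show ¬ streak ≥ 30 from by omega, show streak < 30 from by omega]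
    by_cases c4 : streak < 14
    · simp [pvBisect, pvThresholds, pvIcons, List.foldl, show streak ≥ 1 from by omega, show ¬ streak < 1 from by omega, show streak ≥ 2 from by omega, show ¬ streak < 2 from by omega, show streak ≥ 3 from by omega, show ¬ streak < 3 from by omega, show streak ≥ 7 from by omega, show ¬ streak < 7 from by omega, show ¬ streak ≥ 14 from by omega, show streak < 14 from by omega, show ¬ streak ≥ 30 from by omega, show streak < 30 from by omega]
    by_cases c5 : streak < 30
    · simp [pvBisect, pvThresholds, pvIcons, List.foldl, show streak ≥ 1 from by omega, show ¬ streak < 1 from by omega, show streak ≥ 2 from by omega, show ¬ streak < 2 from by omega, show streak ≥ 3 from by omega, show ¬ streak < 3 from by omega, show streak ≥ 7 from by omega, show ¬ streak < 7 from by omega, show streak ≥ 14 from by omega, show ¬ streak < 14 from by omega, show ¬ streak ≥ 30 from by omega, show streak < 30 from by omega]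
    · simp [pvBisect, pvThresholds, pvIcons, List.foldl, show streak ≥ 1 from by omega, show ¬ streak < 1 from by omega, show streak ≥ 2 from by omega, show ¬ streak < 2 from by omega, show streak ≥ 3 from by omega, show ¬ streak < 3 from by omega, show streak ≥ 7 from by omega, show ¬ streak < 7 from by omega, show streak ≥ 14 from by omega, show ¬ streak < 14 from by omega, show streak ≥ 30 from by omega, show ¬ streak < 30 from by omega]
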